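-- pv_equiv track=rewrite | github.com/jdoeun/Algorithm-Study | iceprins/241014/PSG_최고의_집합.py | solution
-- ===== SOURCE A (Python) =====
-- def solution(n, s):
--     answer = []
--
--     if s < n:
--         return [-1]
--
--     q = s // n
--     r = s % n
--
--     for i in range(n):
--         answer.append(q)
--
--     if r != 0:
--         for i in range(n):
--             answer[i] += 1
--             r -= 1
--             if r == 0:
--                 break
--
--     answer.sort()
--
--     return answer
-- ===== SOURCE B (Python) =====
-- def solution(n, s):
--     if s < n:
--         return [-1]
--     out = []
--     while n > 0:
--         x = -(-s // n)   # ceil(s/n): the largest element of the optimal multiset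
--         out.append(x)
--         s -= x
--         n -= 1
--     out.reverse()
--     return out
-- ===== Notes on version B (the rewrite author's own statement) =====
-- stated objective: alternative
-- what changed: B replaces A's fill-with-q loop, index-increment loop with break and final sort by a greedy peeling loop: it repeatedly extracts the largest element ceil(s/n), recurses on (n-1, s-that), and reverses the collected list.
import Mathlib
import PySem

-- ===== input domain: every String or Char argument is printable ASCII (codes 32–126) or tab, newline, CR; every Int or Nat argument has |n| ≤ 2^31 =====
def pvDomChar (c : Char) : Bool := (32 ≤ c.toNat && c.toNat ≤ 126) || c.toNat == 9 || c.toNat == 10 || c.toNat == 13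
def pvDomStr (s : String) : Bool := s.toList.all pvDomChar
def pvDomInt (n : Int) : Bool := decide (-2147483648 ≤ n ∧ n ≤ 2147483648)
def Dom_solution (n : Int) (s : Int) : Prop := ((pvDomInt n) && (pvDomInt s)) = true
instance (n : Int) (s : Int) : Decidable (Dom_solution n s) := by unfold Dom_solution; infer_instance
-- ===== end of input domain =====

-- B is an alternative algorithm: it greedily peels off the LARGEST element of the
-- answer, ceil(s/n), recursing on (n-1, s - ceil(s/n)), and reverses at the end —
-- no divmod block construction, no index-mutation loop, no sort.

-- ===== PORT A =====
-- the 'for i in range(n): answer[i] += 1; r -= 1; if r == 0: break' loop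
-- (i is always a valid index into answer in A, so answer[i] += 1 is List.modify i.toNat)
def solutionLoop : List Int → Int → List Int → List Int × Int
  | ans, r, [] => (ans, r)
  | ans, r, i :: rest =>
    let ans' := ans.modify i.toNat (· + 1)
    let r' := r - 1
    if r' = 0 then (ans', r') else solutionLoop ans' r' rest

def solution (n : Int) (s : Int) : List Int :=
  if s < n then [-1]
  else
    let q := PySem.Int.floordiv s n
    let r := PySem.Int.mod s n
    let answer := (PySem.List.pyRange 0 n 1).foldl (fun acc _ => acc ++ [q]) ([] : List Int)
    let answer := if r ≠ 0 then (solutionLoop answer r (PySem.List.pyRange 0 n 1)).1 else answer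
    PySem.List.sorted answer (fun x => x)

-- ===== PORT B =====
-- the 'while n > 0: x = -(-s // n); out.append(x); s -= x; n -= 1' loop
def altLoop (out : List Int) (n : Int) (s : Int) : List Int :=
  if _h : 0 < n then
    let x := -(PySem.Int.floordiv (-s) n)
    altLoop (out ++ [x]) (n - 1) (s - x)
  else out
termination_by n.toNat
decreasing_by omega

def solution_alt (n : Int) (s : Int) : List Int :=
  if s < n then [-1]
  else (altLoop [] n s).reverse

-- ===== PRECONDITION & SPEC =====
-- Pre_ excludes exactly the inputs where A raises ZeroDivisionError (n = 0 with s ≥ 0).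
def Pre_solution (n : Int) (s : Int) : Prop := n = 0 → s < 0
instance (n : Int) (s : Int) : Decidable (Pre_solution n s) := by unfold Pre_solution; infer_instance
def pvWitness_solution : Int × Int := (5, 9)

def Spec_solution (n : Int) (s : Int) (out : List Int) : Prop := out = solution_alt n s
instance (n : Int) (s : Int) (out : List Int) : Decidable (Spec_solution n s out) := by unfold Spec_solution; infer_instance

-- ===== CLAIM (what is proved, stated in full; the proofs are below) =====
def Claim_equal_solution : Prop := ∀ (n : Int) (s : Int), Dom_solution n s → Pre_solution n s → Spec_solution n s (solution n s)
-- ===== LEMMAS AND PROOFS =====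

-- A's append loop builds a constant list
lemma foldl_append_replicate (q : Int) : ∀ (l : List Int) (init : List Int),
    l.foldl (fun acc _ => acc ++ [q]) init = init ++ List.replicate l.length q := by
  intro l
  induction l with
  | nil => simp
  | cons x t ih =>
    intro init
    simp only [List.foldl_cons, ih, List.length_cons, List.replicate_succ]
    simp [List.append_assoc]

-- modifying position a of (replicate a x ++ y :: t) hits y
lemma modify_rep_append (x : Int) (f : Int → Int) : ∀ (a : Nat) (y : Int) (t : List Int),
    (List.replicate a x ++ y :: t).modify a f = List.replicate a x ++ f y :: t := by
  intro a
  induction a with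
  | zero => simp
  | succ m ih =>
    intro y t
    simp [List.replicate_succ, ih y t]

lemma solutionLoop_spec (q : Int) : ∀ (k a b : Nat), 1 ≤ k → k ≤ b →
    solutionLoop (List.replicate a (q + 1) ++ List.replicate b q) (k : Int)
      (PySem.List.pyRange (a : Int) ((a : Int) + (b : Int)) 1) =
    (List.replicate (a + k) (q + 1) ++ List.replicate (b - k) q, 0) := by
  intro k
  induction k with
  | zero => omega
  | succ j ih =>
    intro a b _ hkb
    have hb : 1 ≤ b := by omega
    have hab : (a : Int) < (a : Int) + (b : Int) := by omega
    rw [PySem.List.pyRange_one_cons hab]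
    have hrep : List.replicate b q = q :: List.replicate (b - 1) q := by
      cases b with
      | zero => omega
      | succ m => simp [List.replicate_succ]
    rw [hrep]
    simp only [solutionLoop, Int.toNat_natCast, modify_rep_append]
    have hans : List.replicate a (q + 1) ++ (q + 1) :: List.replicate (b - 1) q
        = List.replicate (a + 1) (q + 1) ++ List.replicate (b - 1) q := by
      simp [List.replicate_succ', List.append_assoc]
    have hcast : ((j + 1 : Nat) : Int) - 1 = (j : Int) := by push_cast; ring
    rw [hcast]
    by_cases hj : j = 0
    · subst hj
      simp only [hans]
      norm_num
    · have hjz : (j : Int) ≠ 0 := by omega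
      have harg : PySem.List.pyRange ((a : Int) + 1) ((a : Int) + (b : Int)) 1
          = PySem.List.pyRange ((a + 1 : Nat) : Int) (((a + 1 : Nat) : Int) + ((b - 1 : Nat) : Int)) 1 := by
        congr 1
        all_goals omega
      rw [if_neg hjz, harg, hans, ih (a + 1) (b - 1) (by omega) (by omega)]
      have e1 : a + 1 + j = a + (j + 1) := by omega
      have e2 : b - 1 - j = b - (j + 1) := by omega
      rw [e1, e2]

-- sorting (k copies of q+1) ++ (m copies of q) yields (m copies of q) ++ (k copies of q+1)
lemma sorted_two_blocks (q : Int) (k m : Nat) :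
    PySem.List.sorted (List.replicate k (q + 1) ++ List.replicate m q) (fun x => x)
      = List.replicate m q ++ List.replicate k (q + 1) := by
  apply PySem.List.sorted_id_eq_of_perm_of_pairwise
  · exact List.perm_append_comm
  · rw [List.pairwise_append]
    refine ⟨?_, ?_, ?_⟩
    · exact (List.pairwise_replicate).mpr (Or.inr le_rfl)
    · exact (List.pairwise_replicate).mpr (Or.inr le_rfl)
    · intro x hx y hy
      rw [List.eq_of_mem_replicate hx, List.eq_of_mem_replicate hy]
      omega

-- A's value in canonical block form (n > 0, q/r = divmod)
lemma solution_eq_blocks (n s : Int) (hn : 0 < n) (hs : ¬ s < n) :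
    solution n s = List.replicate (n - PySem.Int.mod s n).toNat (PySem.Int.floordiv s n)
      ++ List.replicate (PySem.Int.mod s n).toNat (PySem.Int.floordiv s n + 1) := by
  have hr0 : 0 ≤ PySem.Int.mod s n := PySem.Int.mod_nonneg s hn
  have hrlt : PySem.Int.mod s n < n := PySem.Int.mod_lt s hn
  unfold solution
  rw [if_neg hs]
  set q := PySem.Int.floordiv s n with hq
  set r := PySem.Int.mod s n with hrdef
  have hbuild : (PySem.List.pyRange 0 n 1).foldl (fun acc _ => acc ++ [q]) ([] : List Int)
      = List.replicate n.toNat q := by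
    rw [foldl_append_replicate, PySem.List.length_pyRange_one]
    simp
  by_cases hr : r = 0
  · simp only [hr, if_neg (by simp : ¬ ((0:Int) ≠ 0)), hbuild]
    have : PySem.List.sorted (List.replicate n.toNat q) (fun x => x)
        = List.replicate n.toNat q :=
      PySem.List.sorted_id_eq_of_perm_of_pairwise _ _ (List.Perm.refl _)
        ((List.pairwise_replicate).mpr (Or.inr le_rfl))
    rw [this]
    simp
  · have hk1 : 1 ≤ r.toNat := by omega
    have hkb : r.toNat ≤ n.toNat := by omega
    have hrange : PySem.List.pyRange 0 n 1
        = PySem.List.pyRange ((0 : Nat) : Int) (((0 : Nat) : Int) + (n.toNat : Int)) 1 := by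
      congr 1
      all_goals omega
    have hrc : ((r.toNat : Nat) : Int) = r := by omega
    have hloop := solutionLoop_spec q r.toNat 0 n.toNat hk1 hkb
    rw [hrc] at hloop
    rw [show List.replicate ((0:Nat)) (q+1) ++ List.replicate n.toNat q
          = List.replicate n.toNat q by simp] at hloop
    simp only [if_pos hr]
    rw [hbuild, hrange, hloop, Nat.zero_add, sorted_two_blocks]
    have e1 : n.toNat - r.toNat = (n - r).toNat := by omega
    rw [e1]

-- B's greedy loop: on n = m, s = m*q + k with k ≤ m it emits k copies of q+1 then m-k copies of q
lemma altLoop_spec (q : Int) : ∀ (m k : Nat) (out : List Int), k ≤ m →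
    altLoop out (m : Int) ((m : Int) * q + (k : Int))
      = out ++ List.replicate k (q + 1) ++ List.replicate (m - k) q := by
  intro m
  induction m with
  | zero =>
    intro k out hk
    have : k = 0 := by omega
    subst this
    rw [altLoop]
    simp
  | succ m ih =>
    intro k out hk
    rw [altLoop]
    have hpos : (0 : Int) < ((m + 1 : Nat) : Int) := by positivity
    rw [dif_pos hpos]
    by_cases hk0 : k = 0
    · subst hk0
      have hx : -(PySem.Int.floordiv (-(((m + 1 : Nat) : Int) * q + ((0 : Nat) : Int))) ((m + 1 : Nat) : Int)) = q := by
        rw [PySem.Int.neg_floordiv_neg_eq_iff_of_pos hpos]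
        constructor
        · push_cast
          nlinarith
        · push_cast
          nlinarith
      simp only [hx]
      have hs' : ((m + 1 : Nat) : Int) * q + ((0 : Nat) : Int) - q = (m : Int) * q + ((0 : Nat) : Int) := by
        push_cast; ring
      have hn' : ((m + 1 : Nat) : Int) - 1 = (m : Int) := by push_cast; ring
      rw [hs', hn', ih 0 (out ++ [q]) (by omega)]
      simp [List.replicate_succ]
    · have hk1 : 1 ≤ k := by omega
      have hx : -(PySem.Int.floordiv (-(((m + 1 : Nat) : Int) * q + (k : Int))) ((m + 1 : Nat) : Int)) = q + 1 := by
        rw [PySem.Int.neg_floordiv_neg_eq_iff_of_pos hpos]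
        have h1 : ((k : Int)) ≤ ((m + 1 : Nat) : Int) := by exact_mod_cast hk
        have h2 : (1 : Int) ≤ (k : Int) := by exact_mod_cast hk1
        constructor <;> nlinarith
      simp only [hx]
      have hs' : ((m + 1 : Nat) : Int) * q + (k : Int) - (q + 1) = (m : Int) * q + ((k - 1 : Nat) : Int) := by
        have : ((k - 1 : Nat) : Int) = (k : Int) - 1 := by omega
        rw [this]; push_cast; ring
      have hn' : ((m + 1 : Nat) : Int) - 1 = (m : Int) := by push_cast; ring
      rw [hs', hn', ih (k - 1) (out ++ [q + 1]) (by omega)]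
      have e1 : List.replicate k (q + 1) = (q + 1) :: List.replicate (k - 1) (q + 1) := by
        cases k with
        | zero => omega
        | succ j => simp [List.replicate_succ]
      have e2 : m + 1 - k = m - (k - 1) := by omega
      rw [e1, e2]
      simp [List.append_assoc]

-- B's value in the same canonical block form (n > 0)
lemma solution_alt_eq_blocks (n s : Int) (hn : 0 < n) (hs : ¬ s < n) :
    solution_alt n s = List.replicate (n - PySem.Int.mod s n).toNat (PySem.Int.floordiv s n)
      ++ List.replicate (PySem.Int.mod s n).toNat (PySem.Int.floordiv s n + 1) := by
  have hr0 : 0 ≤ PySem.Int.mod s n := PySem.Int.mod_nonneg s hn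
  have hrlt : PySem.Int.mod s n < n := PySem.Int.mod_lt s hn
  set q := PySem.Int.floordiv s n with hq
  set r := PySem.Int.mod s n with hrdef
  have hsum : q * n + r = s := PySem.Int.floordiv_mul_add_mod s n
  unfold solution_alt
  rw [if_neg hs]
  have key := altLoop_spec q n.toNat r.toNat [] (by omega)
  rw [show ((n.toNat : Nat) : Int) = n by omega] at key
  have hrc : ((r.toNat : Nat) : Int) = r := by omega
  rw [hrc] at key
  have hs2 : n * q + r = s := by linear_combination hsum
  rw [hs2, List.nil_append] at key
  rw [key, List.reverse_append, List.reverse_replicate, List.reverse_replicate]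
  congr 2
  omega

-- ===== VERDICT (by name: the statement is the Claim_ definition above) =====
theorem solution_spec : Claim_equal_solution := by
  intro n s _ hpre
  unfold Spec_solution
  by_cases hs : s < n
  · unfold solution solution_alt
    simp [hs]
  · have hn0 : n ≠ 0 := by
      intro h
      have := hpre h
      omega
    rcases lt_or_gt_of_ne hn0 with hneg | hpos
    · -- n < 0: A returns [], B returns []
      have hrange : PySem.List.pyRange 0 n 1 = [] :=
        PySem.List.pyRange_one_eq_nil (by omega)
      have hB : altLoop [] n s = [] := by
        rw [altLoop, dif_neg (by omega)]
      unfold solution solution_alt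
      simp [hs, hrange, solutionLoop, hB, PySem.List.sorted]
    · rw [solution_eq_blocks n s hpos hs, solution_alt_eq_blocks n s hpos hs]
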